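-- pv_equiv track=rewrite | github.com/Pupolina7/Assignments | DNP/week5/src/bratnode.py | find_predecessor
-- ===== SOURCE A (Python) =====
-- CHORD = [2, 16, 24, 25, 26, 31]
--
-- def find_predecessor(target):
--     if target == CHORD[0]:
--         return CHORD[-1]
--     for i in range(1, len(CHORD)):
--         if target == CHORD[i]:
--             return CHORD[i - 1]
--     for i in range(1, len(CHORD)):
--         if target < CHORD[i]:
--             return CHORD[i - 1]
--     return CHORD[-1]
-- ===== SOURCE B (Python) =====
-- CHORD = [2, 16, 24, 25, 26, 31]
--
-- def find_predecessor(target):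
--     # binary search (bisect_left, hand-rolled since the module imports nothing)
--     if target == CHORD[0]:
--         return CHORD[-1]
--     lo, hi = 0, len(CHORD)
--     while lo < hi:
--         mid = (lo + hi) // 2
--         if CHORD[mid] < target:
--             lo = mid + 1
--         else:
--             hi = mid
--     if lo == 0:
--         return CHORD[0]
--     return CHORD[lo - 1]
-- ===== Notes on version B (the rewrite author's own statement) =====
-- stated objective: alternative
-- what changed: Replaces A's two linear scans (equality pass then less-than pass) by a single hand-rolled bisect_left binary search over the sorted CHORD, keeping the CHORD[0] wrap guard.
import Mathlib
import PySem

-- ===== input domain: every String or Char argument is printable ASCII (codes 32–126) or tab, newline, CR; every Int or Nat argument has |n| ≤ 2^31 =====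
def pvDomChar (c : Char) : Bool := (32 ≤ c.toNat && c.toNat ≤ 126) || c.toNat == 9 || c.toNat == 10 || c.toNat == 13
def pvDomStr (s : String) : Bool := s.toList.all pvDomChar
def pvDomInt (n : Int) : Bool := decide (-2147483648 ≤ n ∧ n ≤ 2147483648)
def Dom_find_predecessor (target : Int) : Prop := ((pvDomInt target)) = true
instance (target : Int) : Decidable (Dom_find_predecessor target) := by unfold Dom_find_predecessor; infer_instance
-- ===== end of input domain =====

-- B replaces A's two linear scans by a hand-rolled bisect_left binary search; return values agree on all ints.

-- ===== PORT A =====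
def pyCHORD : List Int := [2, 16, 24, 25, 26, 31]

-- first loop: for i in range(1, len(CHORD)): if target == CHORD[i]: return CHORD[i-1]
def fpEqLoop (target : Int) : List Int → Option Int
  | [] => none
  | i :: rest =>
    if target = PySem.List.pyGetD pyCHORD i 0 then some (PySem.List.pyGetD pyCHORD (i - 1) 0)
    else fpEqLoop target rest

-- second loop: for i in range(1, len(CHORD)): if target < CHORD[i]: return CHORD[i-1]
def fpLtLoop (target : Int) : List Int → Option Int
  | [] => none
  | i :: rest =>
    if target < PySem.List.pyGetD pyCHORD i 0 then some (PySem.List.pyGetD pyCHORD (i - 1) 0)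
    else fpLtLoop target rest

def find_predecessor (target : Int) : Int :=
  if target = PySem.List.pyGetD pyCHORD 0 0 then PySem.List.pyGetD pyCHORD (-1) 0
  else
    match fpEqLoop target (PySem.List.pyRange 1 ((pyCHORD.length : Int)) 1) with
    | some r => r
    | none =>
      match fpLtLoop target (PySem.List.pyRange 1 ((pyCHORD.length : Int)) 1) with
      | some r => r
      | none => PySem.List.pyGetD pyCHORD (-1) 0

-- ===== PORT B =====
-- the while-loop of Source B: lo, hi narrow until lo = hi (bisect_left)
def fpBisect (target : Int) (lo hi : Nat) : Nat :=
  if h : lo < hi then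
    let mid := (lo + hi) / 2
    if PySem.List.pyGetD pyCHORD (mid : Int) 0 < target then fpBisect target (mid + 1) hi
    else fpBisect target lo mid
  else lo
termination_by hi - lo
decreasing_by all_goals omega

def find_predecessor_alt (target : Int) : Int :=
  if target = PySem.List.pyGetD pyCHORD 0 0 then PySem.List.pyGetD pyCHORD (-1) 0
  else
    let lo := fpBisect target 0 pyCHORD.length
    if lo = 0 then PySem.List.pyGetD pyCHORD 0 0
    else PySem.List.pyGetD pyCHORD ((lo : Int) - 1) 0

-- ===== PRECONDITION & SPEC =====
def Spec_find_predecessor (target : Int) (out : Int) : Prop := out = find_predecessor_alt target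
instance (target : Int) (out : Int) : Decidable (Spec_find_predecessor target out) := by unfold Spec_find_predecessor; infer_instance

-- ===== CLAIM (what is proved, stated in full; the proofs are below) =====
def Claim_equal_find_predecessor : Prop := ∀ (target : Int), Dom_find_predecessor target → Spec_find_predecessor target (find_predecessor target)

-- ===== LEMMAS AND PROOFS =====
theorem fpB_eval (t : Int) :
    fpBisect t 0 6 =
      (if 25 < t then (if 26 < t then (if 31 < t then 6 else 5) else 4)
       else (if 16 < t then (if 24 < t then 3 else 2) else (if 2 < t then 1 else 0))) := by
  have e66 : fpBisect t 6 6 = 6 := by rw [fpBisect]; simp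
  have e55 : fpBisect t 5 5 = 5 := by rw [fpBisect]; simp
  have e44 : fpBisect t 4 4 = 4 := by rw [fpBisect]; simp
  have e33 : fpBisect t 3 3 = 3 := by rw [fpBisect]; simp
  have e22 : fpBisect t 2 2 = 2 := by rw [fpBisect]; simp
  have e11 : fpBisect t 1 1 = 1 := by rw [fpBisect]; simp
  have e00 : fpBisect t 0 0 = 0 := by rw [fpBisect]; simp
  have e45 : fpBisect t 4 5 = if 26 < t then 5 else 4 := by
    rw [fpBisect]; norm_num [pyCHORD, PySem.List.pyGetD, PySem.List.pyIdx?, Int.toNat, PySem.List.pyGet?, List.getElem_cons_succ, List.getElem_cons_zero, e55, e44]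
  have e46 : fpBisect t 4 6 = if 31 < t then (if 26 < t then 6 else 6) else (if 26 < t then 5 else 4) := by
    rw [fpBisect]; norm_num [pyCHORD, PySem.List.pyGetD, PySem.List.pyIdx?, Int.toNat, PySem.List.pyGet?, List.getElem_cons_succ, List.getElem_cons_zero, e66, e45]
  have e23 : fpBisect t 2 3 = if 24 < t then 3 else 2 := by
    rw [fpBisect]; norm_num [pyCHORD, PySem.List.pyGetD, PySem.List.pyIdx?, Int.toNat, PySem.List.pyGet?, List.getElem_cons_succ, List.getElem_cons_zero, e33, e22]
  have e01 : fpBisect t 0 1 = if 2 < t then 1 else 0 := by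
    rw [fpBisect]; norm_num [pyCHORD, PySem.List.pyGetD, PySem.List.pyIdx?, Int.toNat, PySem.List.pyGet?, List.getElem_cons_succ, List.getElem_cons_zero, e11, e00]
  have e03 : fpBisect t 0 3 = if 16 < t then (if 24 < t then 3 else 2) else (if 2 < t then 1 else 0) := by
    rw [fpBisect]; norm_num [pyCHORD, PySem.List.pyGetD, PySem.List.pyIdx?, Int.toNat, PySem.List.pyGet?, List.getElem_cons_succ, List.getElem_cons_zero, e23, e01]
  rw [fpBisect]; norm_num [pyCHORD, PySem.List.pyGetD, PySem.List.pyIdx?, Int.toNat, PySem.List.pyGet?, List.getElem_cons_succ, List.getElem_cons_zero, e46, e03]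
  split_ifs <;> omega

theorem eqLoop_eval (t : Int) :
    fpEqLoop t [1, 2, 3, 4, 5] =
      (if t = 16 then some 2 else if t = 24 then some 16 else if t = 25 then some 24
       else if t = 26 then some 25 else if t = 31 then some 26 else none) := by
  simp [fpEqLoop, pyCHORD, PySem.List.pyGetD, PySem.List.pyGet?, PySem.List.pyIdx?]

theorem ltLoop_eval (t : Int) :
    fpLtLoop t [1, 2, 3, 4, 5] =
      (if t < 16 then some 2 else if t < 24 then some 16 else if t < 25 then some 24
       else if t < 26 then some 25 else if t < 31 then some 26 else none) := by
  simp only [fpLtLoop, pyCHORD, PySem.List.pyGetD, PySem.List.pyGet?, PySem.List.pyIdx?]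
  norm_num [Int.toNat, List.getElem_cons_succ, List.getElem_cons_zero]

set_option maxHeartbeats 1000000 in
theorem fp_agree (target : Int) : find_predecessor target = find_predecessor_alt target := by
  have hr : PySem.List.pyRange 1 ((pyCHORD.length : Int)) 1 = [1, 2, 3, 4, 5] := by decide
  have hlen : pyCHORD.length = 6 := by decide
  have g0 : PySem.List.pyGetD pyCHORD 0 0 = 2 := by decide
  have gm1 : PySem.List.pyGetD pyCHORD (-1) 0 = 31 := by decide
  unfold find_predecessor find_predecessor_alt
  rw [hr, hlen, g0, gm1, eqLoop_eval, ltLoop_eval, fpB_eval]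
  split_ifs <;>
    norm_num [pyCHORD, PySem.List.pyGetD, PySem.List.pyGet?, PySem.List.pyIdx?, Int.toNat,
      List.getElem_cons_succ, List.getElem_cons_zero] <;>
    omega

-- ===== VERDICT (by name: the statement is the Claim_ definition above) =====
theorem find_predecessor_spec : Claim_equal_find_predecessor := by
  intro t _
  unfold Spec_find_predecessor
  exact fp_agree t
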